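-- pv_equiv track=rewrite | github.com/wcjordan/chalk | rrweb_feature_extraction/rrweb_ingest/segmenter.py | segment_into_chunks
-- ===== SOURCE A (Python) =====
-- from typing import List
--
-- def segment_into_chunks(
--     interactions: List[dict],
--     snapshots: List[dict],
--     max_gap_ms: int = 10_000,
--     max_events: int = 1000,
-- ) -> List[List[dict]]:
--     """
--     Segment interaction events into chunks based on multiple boundary criteria.
--
--     Takes sorted lists of interaction events (type == 3) and snapshot events (type == 2)
--     and groups interactions into chunks. A new chunk is started when any of these
--     conditions are met:
--     1. An interaction's timestamp meets or exceeds the next FullSnapshot timestamp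
--     2. The time gap between consecutive interactions exceeds max_gap_ms
--     3. The current chunk reaches max_events in size
--
--     Args:
--         interactions: List of interaction events (type == 3) sorted by timestamp
--         snapshots: List of snapshot events (type == 2) sorted by timestamp
--         max_gap_ms: Maximum time gap in milliseconds between consecutive interactions
--                    before starting a new chunk (default: 10,000ms)
--         max_events: Maximum number of events per chunk before starting a new chunk
--                    (default: 1000 events)
--
--     Returns:
--         List of chunks, where each chunk is a list of contiguous interaction events
--         respecting all boundary conditions. If no snapshots exist, returns chunks
--         based only on time gaps and size limits. If no interactions exist, returns
--         an empty list.
--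
--     Example:
--         interactions = [
--             {"type": 3, "timestamp": 100, "data": {}},
--             {"type": 3, "timestamp": 200, "data": {}},
--             {"type": 3, "timestamp": 15000, "data": {}},  # Large time gap
--         ]
--         snapshots = [
--             {"type": 2, "timestamp": 150, "data": {}},
--         ]
--
--         With max_gap_ms=10000, result: [
--             [{"type": 3, "timestamp": 100, "data": {}}],  # Before snapshot
--             [{"type": 3, "timestamp": 200, "data": {}}],  # Between snapshot and gap
--             [{"type": 3, "timestamp": 15000, "data": {}}],  # After large gap
--         ]
--     """
--     # Handle edge cases
--     if not interactions:
--         return []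
--
--     chunks = []
--     current_chunk = []
--     snapshot_iter = iter(snapshots)
--     next_snapshot = next(snapshot_iter, None)
--     last_timestamp = None
--
--     for interaction in interactions:
--         interaction_timestamp = interaction["timestamp"]
--
--         # Check if we need to start a new chunk due to snapshot boundary
--         while next_snapshot and interaction_timestamp >= next_snapshot["timestamp"]:
--             # Finish current chunk if it has events
--             if current_chunk:
--                 chunks.append(current_chunk)
--                 current_chunk = []
--                 # Reset timestamp so next interaction isn't compared against the prior chunk
--                 last_timestamp = None
--
--             # Move to next snapshot
--             next_snapshot = next(snapshot_iter, None)
--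
--         # Check if we need to start a new chunk due to time gap
--         if (
--             last_timestamp is not None
--             and interaction_timestamp - last_timestamp > max_gap_ms
--         ):
--             # Finish current chunk if it has events
--             if current_chunk:
--                 chunks.append(current_chunk)
--                 current_chunk = []
--
--         # Check if we need to start a new chunk due to size limit
--         if len(current_chunk) >= max_events:
--             # Finish current chunk
--             chunks.append(current_chunk)
--             current_chunk = []
--             # Reset timestamp so next interaction isn't compared against the prior chunk
--             last_timestamp = None
--
--         # Add interaction to current chunk
--         current_chunk.append(interaction)
--         last_timestamp = interaction_timestamp
--
--     # Add final chunk if it has events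
--     if current_chunk:
--         chunks.append(current_chunk)
--
--     return chunks
-- ===== SOURCE B (Python) =====
-- from typing import List
--
-- def segment_into_chunks(
--     interactions: List[dict],
--     snapshots: List[dict],
--     max_gap_ms: int = 10_000,
--     max_events: int = 1000,
-- ) -> List[List[dict]]:
--     """Segment interactions into chunks in two independent stages.
--
--     Stage 1 computes, per interaction, a state-free "forced boundary" flag:
--     a boundary is forced where the event crosses a pending snapshot or follows
--     its predecessor by more than max_gap_ms.  Stage 2 walks the flags once,
--     cutting a chunk at every forced boundary or whenever the running chunk has
--     reached max_events, and emits each chunk as a slice of the input.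
--     No chunk is ever empty."""
--     n = len(interactions)
--     if n == 0:
--         return []
--
--     ts = [e["timestamp"] for e in interactions]
--
--     # Stage 1: forced-boundary flags (snapshot crossings and time gaps).
--     forced = []
--     si = 0
--     prev = None
--     for t in ts:
--         crossed = False
--         while si < len(snapshots) and t >= snapshots[si]["timestamp"]:
--             si += 1
--             crossed = True
--         forced.append(crossed or (prev is not None and t - prev > max_gap_ms))
--         prev = t
--
--     # Stage 2: cut chunks at forced boundaries and at the size cap.
--     chunks = []
--     start = 0
--     for i, f in enumerate(forced):
--         if i and (f or i - start >= max_events):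
--             chunks.append(interactions[start:i])
--             start = i
--     chunks.append(interactions[start:])
--     return chunks
-- ===== Notes on version B (the rewrite author's own statement) =====
-- stated objective: alternative
-- what changed: B splits the work into two independent stages: a first pass computes a state-free per-event forced-boundary flag (snapshot crossing or time gap), and a second pass cuts the input into slices at forced boundaries or at the size cap, instead of A's single fused loop that flushes an accumulating chunk inside the snapshot scan; Pre_ excludes inputs where some interaction or snapshot dict lacks a 'timestamp' key (A raises KeyError on most of these; on an empty or never-inspected snapshot dict A's accidental truthiness stop returns while B's direct timestamp access raises).
-- intended difference: When max_events <= 0 (a nonsensical chunk capacity) and interactions is non-empty, A's size check fires on the empty current chunk and its result starts with an empty chunk (e.g. [[], [e0]]); B cuts at every event and returns only non-empty one-element chunks, which is the intended 'chunks of contiguous events' output. — e.g. on segment_into_chunks([[("timestamp", 0)]], [], 10000, 0): A returns [[], [[("timestamp", 0)]]], B returns [[[("timestamp", 0)]]]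
-- outside the precondition, e.g. on segment_into_chunks([{'timestamp': 0}], [{}], 10000, 1000): A returns [[{'timestamp': 0}]], B raises KeyError
import Mathlib
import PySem

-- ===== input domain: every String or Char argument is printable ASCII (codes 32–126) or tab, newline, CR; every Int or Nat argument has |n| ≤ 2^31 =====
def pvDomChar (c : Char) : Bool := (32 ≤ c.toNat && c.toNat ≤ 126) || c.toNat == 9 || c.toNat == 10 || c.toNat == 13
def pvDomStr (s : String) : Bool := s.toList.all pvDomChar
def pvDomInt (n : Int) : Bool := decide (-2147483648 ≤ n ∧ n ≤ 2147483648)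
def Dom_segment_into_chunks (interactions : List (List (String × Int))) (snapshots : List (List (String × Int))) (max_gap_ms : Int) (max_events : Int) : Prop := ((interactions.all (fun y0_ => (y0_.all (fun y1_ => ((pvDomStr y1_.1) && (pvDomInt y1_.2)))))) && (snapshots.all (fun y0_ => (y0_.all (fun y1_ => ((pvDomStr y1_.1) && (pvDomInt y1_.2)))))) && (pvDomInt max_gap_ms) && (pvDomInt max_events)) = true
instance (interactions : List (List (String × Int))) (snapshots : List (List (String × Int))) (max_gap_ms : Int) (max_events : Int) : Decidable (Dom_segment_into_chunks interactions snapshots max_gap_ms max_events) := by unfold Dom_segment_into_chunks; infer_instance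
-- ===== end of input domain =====

-- B computes per-event forced-boundary flags in a state-free first pass and cuts the
-- input into slices in a second pass, instead of A's fused flush-inside-scan loop;
-- objective: alternative decomposition, same cost.  For max_events ≤ 0 (D_ below)
-- A emits empty chunks while B returns only non-empty chunks.


-- ===== PORT A =====
-- d["timestamp"] (first match in the association list); total form, exact under Pre_ (key present)
def pvGetTs (d : List (String × Int)) : Int := ((PySem.Dict.mk d).get? "timestamp").getD 0

-- A's inner `while next_snapshot and ts >= next_snapshot["timestamp"]`; the remaining
-- snapshot list models the iterator, its head is next_snapshot (none = list exhausted;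
-- an empty dict is falsy and stops the loop, as in Python)
def segASnap (ts : Int) :
    List (List (String × Int)) → List (List (List (String × Int))) → List (List (String × Int)) → Option Int →
    (List (List (String × Int)) × List (List (List (String × Int))) × List (List (String × Int)) × Option Int)
  | [], chunks, cur, last => ([], chunks, cur, last)
  | s :: rest, chunks, cur, last =>
    if s ≠ [] ∧ ts ≥ pvGetTs s then
      if cur ≠ [] then segASnap ts rest (chunks ++ [cur]) [] none
      else segASnap ts rest chunks cur last
    else (s :: rest, chunks, cur, last)

-- A's main `for interaction in interactions` loop
def segALoop (g m : Int) :
    List (List (String × Int)) → List (List (String × Int)) → List (List (List (String × Int))) → List (List (String × Int)) → Option Int →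
    List (List (List (String × Int)))
  | [], _, chunks, cur, _ => if cur ≠ [] then chunks ++ [cur] else chunks
  | i :: rest, snaps, chunks, cur, last =>
    let ts := pvGetTs i
    let s1 := segASnap ts snaps chunks cur last
    let gap : Bool := match s1.2.2.2 with | some l => decide (ts - l > g) | none => false
    let chunks2 := if gap ∧ s1.2.2.1 ≠ [] then s1.2.1 ++ [s1.2.2.1] else s1.2.1
    let cur2 := if gap ∧ s1.2.2.1 ≠ [] then [] else s1.2.2.1
    let size : Bool := decide ((cur2.length : Int) ≥ m)
    let chunks3 := if size then chunks2 ++ [cur2] else chunks2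
    let cur3 := if size then [] else cur2
    segALoop g m rest s1.1 chunks3 (cur3 ++ [i]) (some ts)

def segment_into_chunks (interactions : List (List (String × Int))) (snapshots : List (List (String × Int))) (max_gap_ms : Int) (max_events : Int) : List (List (List (String × Int))) :=
  if interactions = [] then []
  else segALoop max_gap_ms max_events interactions snapshots [] [] none

-- ===== PORT B =====
-- B's stage-1 inner while: advance the snapshot pointer, reporting whether it moved
def segBWhile (S : List (List (String × Int))) (t : Int) (si : Nat) : Nat × Bool :=
  if h : si < S.length ∧ t ≥ pvGetTs (S.getD si []) then
    ((segBWhile S t (si + 1)).1, true)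
  else (si, false)
termination_by S.length - si
decreasing_by omega

-- B's stage 1: `for t in ts`, collecting the forced-boundary flags
def segBFlags (S : List (List (String × Int))) (g : Int) :
    List Int → Nat → Option Int → List Bool
  | [], _, _ => []
  | t :: rest, si, prev =>
    let r := segBWhile S t si
    (r.2 || (match prev with | some p => decide (t - p > g) | none => false))
      :: segBFlags S g rest r.1 (some t)

-- B's stage 2: `for i, f in enumerate(forced)`, cutting slices; returns (chunks, start)
def segBCut (I : List (List (String × Int))) (m : Int) :
    List Bool → Nat → Nat → List (List (List (String × Int))) →
    (List (List (List (String × Int))) × Nat)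
  | [], _, start, acc => (acc, start)
  | f :: rest, i, start, acc =>
    if i ≠ 0 ∧ (f = true ∨ (i : Int) - (start : Int) ≥ m) then
      segBCut I m rest (i + 1) i (acc ++ [PySem.List.slice I (some (start : Int)) (some (i : Int))])
    else segBCut I m rest (i + 1) start acc

def segment_into_chunks_alt (interactions : List (List (String × Int))) (snapshots : List (List (String × Int))) (max_gap_ms : Int) (max_events : Int) : List (List (List (String × Int))) :=
  if interactions = [] then []
  else
    let forced := segBFlags snapshots max_gap_ms (interactions.map pvGetTs) 0 none
    let r := segBCut interactions max_events forced 0 0 []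
    r.1 ++ [PySem.List.slice interactions (some ((r.2 : Nat) : Int)) none]

-- ===== PRECONDITION & SPEC =====
-- Pre_ excludes inputs where some interaction or snapshot dict lacks a "timestamp"
-- key: A raises KeyError on most of them, and on the rest (an empty or key-less
-- snapshot dict that A's accidental truthiness stop never inspects, on which A
-- returns) B's direct timestamp access raises KeyError.
def Pre_segment_into_chunks (interactions : List (List (String × Int))) (snapshots : List (List (String × Int))) (_max_gap_ms : Int) (_max_events : Int) : Prop :=
  interactions ≠ [] →
    ((∀ e ∈ interactions, "timestamp" ∈ e.map Prod.fst) ∧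
     (∀ s ∈ snapshots, "timestamp" ∈ s.map Prod.fst))
instance (interactions : List (List (String × Int))) (snapshots : List (List (String × Int))) (max_gap_ms : Int) (max_events : Int) : Decidable (Pre_segment_into_chunks interactions snapshots max_gap_ms max_events) := by unfold Pre_segment_into_chunks; infer_instance

def pvWitness_segment_into_chunks : (List (List (String × Int))) × (List (List (String × Int))) × Int × Int :=
  ([[("timestamp", 100)], [("timestamp", 200)], [("timestamp", 15000)]], [[("timestamp", 150)]], 10000, 1000)

-- When max_events ≤ 0 (a nonsensical chunk capacity) and interactions is non-empty,
-- A's size check fires on the empty current chunk and its result starts with an empty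
-- chunk; B cuts at every event and returns only non-empty one-element chunks, which is
-- the intended 'chunks of contiguous events' output.
def D_segment_into_chunks (interactions : List (List (String × Int))) (_snapshots : List (List (String × Int))) (_max_gap_ms : Int) (max_events : Int) : Prop :=
  interactions ≠ [] ∧ max_events ≤ 0
instance (interactions : List (List (String × Int))) (snapshots : List (List (String × Int))) (max_gap_ms : Int) (max_events : Int) : Decidable (D_segment_into_chunks interactions snapshots max_gap_ms max_events) := by unfold D_segment_into_chunks; infer_instance

def Spec_segment_into_chunks (interactions : List (List (String × Int))) (snapshots : List (List (String × Int))) (max_gap_ms : Int) (max_events : Int) (out : List (List (List (String × Int)))) : Prop := ¬ D_segment_into_chunks interactions snapshots max_gap_ms max_events → out = segment_into_chunks_alt interactions snapshots max_gap_ms max_events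
instance (interactions : List (List (String × Int))) (snapshots : List (List (String × Int))) (max_gap_ms : Int) (max_events : Int) (out : List (List (List (String × Int)))) : Decidable (Spec_segment_into_chunks interactions snapshots max_gap_ms max_events out) := by unfold Spec_segment_into_chunks; infer_instance

def pvDiffWitness_segment_into_chunks : (List (List (String × Int))) × (List (List (String × Int))) × Int × Int :=
  ([[("timestamp", 0)]], [], 10000, 0)
def pvDiffWitnessOut_segment_into_chunks : (List (List (List (String × Int)))) × (List (List (List (String × Int)))) :=
  ([[], [[("timestamp", 0)]]], [[[("timestamp", 0)]]])

-- ===== CLAIM (what is proved, stated in full; the proofs are below) =====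
def Claim_unchanged_segment_into_chunks : Prop := ∀ (interactions : List (List (String × Int))) (snapshots : List (List (String × Int))) (max_gap_ms : Int) (max_events : Int), Dom_segment_into_chunks interactions snapshots max_gap_ms max_events → Pre_segment_into_chunks interactions snapshots max_gap_ms max_events → Spec_segment_into_chunks interactions snapshots max_gap_ms max_events (segment_into_chunks interactions snapshots max_gap_ms max_events)
def Claim_changed_segment_into_chunks : Prop := Dom_segment_into_chunks (pvDiffWitness_segment_into_chunks.1) (pvDiffWitness_segment_into_chunks.2.1) (pvDiffWitness_segment_into_chunks.2.2.1) (pvDiffWitness_segment_into_chunks.2.2.2) ∧ Pre_segment_into_chunks (pvDiffWitness_segment_into_chunks.1) (pvDiffWitness_segment_into_chunks.2.1) (pvDiffWitness_segment_into_chunks.2.2.1) (pvDiffWitness_segment_into_chunks.2.2.2) ∧ D_segment_into_chunks (pvDiffWitness_segment_into_chunks.1) (pvDiffWitness_segment_into_chunks.2.1) (pvDiffWitness_segment_into_chunks.2.2.1) (pvDiffWitness_segment_into_chunks.2.2.2) ∧ segment_into_chunks (pvDiffWitness_segment_into_chunks.1) (pvDiffWitness_segment_into_chunks.2.1) (pvDiffWitness_segment_into_chunks.2.2.1)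 (pvDiffWitness_segment_into_chunks.2.2.2) = pvDiffWitnessOut_segment_into_chunks.1 ∧ segment_into_chunks_alt (pvDiffWitness_segment_into_chunks.1) (pvDiffWitness_segment_into_chunks.2.1) (pvDiffWitness_segment_into_chunks.2.2.1) (pvDiffWitness_segment_into_chunks.2.2.2) = pvDiffWitnessOut_segment_into_chunks.2 ∧ pvDiffWitnessOut_segment_into_chunks.1 ≠ pvDiffWitnessOut_segment_into_chunks.2
def Claim_exact_segment_into_chunks : Prop := ∀ (interactions : List (List (String × Int))) (snapshots : List (List (String × Int))) (max_gap_ms : Int) (max_events : Int), Dom_segment_into_chunks interactions snapshots max_gap_ms max_events → Pre_segment_into_chunks interactions snapshots max_gap_ms max_events → D_segment_into_chunks interactions snapshots max_gap_ms max_events → segment_into_chunks interactions snapshots max_gap_ms max_events ≠ segment_into_chunks_alt interactions snapshots max_gap_ms max_events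

-- ===== LEMMAS AND PROOFS =====

-- interactions[a:b] for Nat bounds
def sliceN (I : List (List (String × Int))) (a b : Nat) : List (List (String × Int)) :=
  (I.drop a).take (b - a)

lemma sliceN_self (I : List (List (String × Int))) (a : Nat) : sliceN I a a = [] := by
  simp [sliceN]

lemma sliceN_length (I : List (List (String × Int))) (a b : Nat) (_hab : a ≤ b) (hb : b ≤ I.length) :
    (sliceN I a b).length = b - a := by
  simp [sliceN]; omega

lemma sliceN_ne_nil (I : List (List (String × Int))) (a b : Nat) (hab : a < b) (hb : b ≤ I.length) :
    sliceN I a b ≠ [] := by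
  intro hnil
  have := sliceN_length I a b (le_of_lt hab) hb
  rw [hnil] at this
  simp only [List.length_nil] at this
  omega

lemma sliceN_snoc (I : List (List (String × Int))) (a idx : Nat) (i : List (String × Int))
    (rest : List (List (String × Int))) (hd : I.drop idx = i :: rest) (ha : a ≤ idx) :
    sliceN I a (idx + 1) = sliceN I a idx ++ [i] := by
  have hget : I[idx]? = some i := by
    have h0 : (I.drop idx)[0]? = I[idx + 0]? := List.getElem?_drop
    simp [hd] at h0
    simpa using h0.symm
  have h1 : idx + 1 - a = (idx - a) + 1 := by omega
  rw [sliceN, sliceN, h1, List.take_add_one]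
  congr 1
  have : (I.drop a)[idx - a]? = I[idx]? := by
    rw [List.getElem?_drop]
    congr 1
    omega
  rw [this, hget]
  rfl

lemma sliceN_full (I : List (List (String × Int))) (a : Nat) : sliceN I a I.length = I.drop a := by
  simp [sliceN]

-- segASnap is segBWhile plus a single conditional flush
lemma snapA_eq (S : List (List (String × Int))) (t : Int)
    (hS : ∀ s ∈ S, s ≠ []) :
    ∀ d si (chunks : List (List (List (String × Int)))) cur last, S.drop si = d →
    segASnap t d chunks cur last =
      (S.drop (segBWhile S t si).1,
       (if (segBWhile S t si).2 = true ∧ cur ≠ [] then chunks ++ [cur] else chunks),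
       (if (segBWhile S t si).2 = true ∧ cur ≠ [] then [] else cur),
       (if (segBWhile S t si).2 = true ∧ cur ≠ [] then none else last)) := by
  intro d
  induction d with
  | nil =>
    intro si chunks cur last hdrop
    have hsi : S.length ≤ si := by
      by_contra h
      have := List.drop_eq_nil_iff.mp hdrop
      omega
    rw [segBWhile, dif_neg (by intro hx; omega)]
    simp [segASnap, hdrop]
  | cons s d' ih =>
    intro si chunks cur last hdrop
    have hsi : si < S.length := by
      by_contra h
      rw [List.drop_eq_nil_of_le (by omega)] at hdrop
      simp at hdrop
    have hget : S.getD si [] = s := by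
      have h0 : (S.drop si)[0]? = S[si + 0]? := List.getElem?_drop
      rw [hdrop] at h0
      simp at h0
      simp [List.getD_eq_getElem?_getD, ← h0]
    have hdrop' : S.drop (si + 1) = d' := by
      have h0 := congrArg List.tail hdrop
      rw [List.tail_drop] at h0
      simpa using h0
    have hmem : s ∈ S := List.drop_subset si S (by rw [hdrop]; exact List.mem_cons_self)
    have hs_ne : s ≠ [] := hS s hmem
    by_cases hc : t ≥ pvGetTs s
    · rw [segBWhile, dif_pos ⟨hsi, by rw [hget]; exact hc⟩]
      by_cases hcur : cur ≠ []
      · have hA : segASnap t (s :: d') chunks cur last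
            = segASnap t d' (chunks ++ [cur]) [] none := by
          simp only [segASnap]
          rw [if_pos ⟨hs_ne, hc⟩, if_pos hcur]
        rw [hA, ih (si + 1) (chunks ++ [cur]) [] none hdrop']
        simp [hcur]
      · have hA : segASnap t (s :: d') chunks cur last
            = segASnap t d' chunks cur last := by
          simp only [segASnap]
          rw [if_pos ⟨hs_ne, hc⟩, if_neg hcur]
        rw [hA, ih (si + 1) chunks cur last hdrop']
        simp [hcur]
    · rw [segBWhile, dif_neg (by rw [hget]; intro hx; exact hc hx.2)]
      have hA : segASnap t (s :: d') chunks cur last = (s :: d', chunks, cur, last) := by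
        simp only [segASnap]
        rw [if_neg (by intro hx; exact hc hx.2)]
      rw [hA]
      simp [hdrop]

-- main correspondence between A's fused loop and B's two stages
lemma main_corr (I S : List (List (String × Int))) (g m : Int) (hm : 1 ≤ m)
    (hS : ∀ s ∈ S, s ≠ []) :
    ∀ (rest : List (List (String × Int))) (idx si s0 : Nat)
      (acc : List (List (List (String × Int)))) (prev : Option Int),
    I.drop idx = rest → idx ≤ I.length → s0 ≤ idx →
    (idx = 0 → s0 = 0 ∧ prev = none) →
    (0 < idx → s0 < idx ∧ prev = some (pvGetTs (I.getD (idx - 1) []))) →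
    (rest = [] → 0 < idx) →
    segALoop g m rest (S.drop si) acc (sliceN I s0 idx) prev
      = (segBCut I m (segBFlags S g (rest.map pvGetTs) si prev) idx s0 acc).1
        ++ [sliceN I (segBCut I m (segBFlags S g (rest.map pvGetTs) si prev) idx s0 acc).2 I.length] := by
  intro rest
  induction rest with
  | nil =>
    intro idx si s0 acc prev hdrop hidx hs0 h0 hpos hne
    have hlen : idx = I.length := by
      have := List.drop_eq_nil_iff.mp hdrop
      omega
    obtain ⟨hslt, -⟩ := hpos (hne rfl)
    have hcur : sliceN I s0 idx ≠ [] := sliceN_ne_nil I s0 idx hslt (by omega)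
    simp only [List.map_nil, segBFlags, segBCut, segALoop]
    rw [if_pos hcur, hlen]
  | cons e rest' ih =>
    intro idx si s0 acc prev hdrop hidx hs0 h0 hpos hne
    have hlt : idx < I.length := by
      by_contra h
      rw [List.drop_eq_nil_of_le (by omega)] at hdrop
      simp at hdrop
    have hdropI : I.drop (idx + 1) = rest' := by
      have h0' := congrArg List.tail hdrop
      rw [List.tail_drop] at h0'
      simpa using h0'
    have hgetI : I.getD idx [] = e := by
      have h0' : (I.drop idx)[0]? = I[idx + 0]? := List.getElem?_drop
      rw [hdrop] at h0'
      simp at h0'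
      simp [List.getD_eq_getElem?_getD, ← h0']
    have hsingle : sliceN I idx (idx + 1) = [e] := by
      rw [sliceN_snoc I idx idx e rest' hdrop (le_refl idx), sliceN_self]
      rfl
    have hAeq := snapA_eq S (pvGetTs e) hS (S.drop si) si acc (sliceN I s0 idx) prev rfl
    simp only [segALoop, List.map_cons, segBFlags]
    rw [hAeq]
    dsimp only
    set W := segBWhile S (pvGetTs e) si with hW
    by_cases hidx0 : idx = 0
    · subst hidx0
      obtain ⟨hs00, hprev⟩ := h0 rfl
      subst hs00 hprev
      rw [sliceN_self] at *
      have hs01 : sliceN I 0 1 = [e] := hsingle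
      have hflush : ¬ (W.2 = true ∧ ([] : List (List (String × Int))) ≠ []) := by simp
      simp only [if_neg hflush]
      have hg2 : ¬ ((false : Bool) = true ∧ ([] : List (List (String × Int))) ≠ []) := by simp
      simp only [if_neg hg2]
      have hszE : decide ((([] : List (List (String × Int))).length : Int) ≥ m) = false :=
        decide_eq_false (by simp only [List.length_nil, Nat.cast_zero]; omega)
      simp only [hszE, Bool.false_eq_true, if_false]
      simp only [segBCut]
      rw [if_neg (fun h => h.1 rfl)]
      rw [show (([] : List (List (String × Int))) ++ [e]) = sliceN I 0 1 by rw [hs01]; exact List.nil_append _]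
      exact ih 1 W.1 0 acc (some (pvGetTs e)) hdropI (by omega) (by omega)
        (by omega) (fun _ => ⟨by omega, by rw [show (1 : Nat) - 1 = 0 from rfl, hgetI]⟩)
        (fun _ => by omega)
    · obtain ⟨hslt, hprev⟩ := hpos (by omega)
      subst hprev
      have hcur : sliceN I s0 idx ≠ [] := sliceN_ne_nil I s0 idx hslt (by omega)
      set p := pvGetTs (I.getD (idx - 1) []) with hp
      have hszE : decide ((([] : List (List (String × Int))).length : Int) ≥ m) = false :=
        decide_eq_false (by simp only [List.length_nil, Nat.cast_zero]; omega)
      have hlenc : ((sliceN I s0 idx).length : Int) = (idx : Int) - (s0 : Int) := by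
        rw [sliceN_length I s0 idx (by omega) (by omega)]
        push_cast
        omega
      have hsnoc : sliceN I s0 idx ++ [e] = sliceN I s0 (idx + 1) :=
        (sliceN_snoc I s0 idx e rest' hdrop (by omega)).symm
      -- the three cut cases share one continuation
      have CUT : segALoop g m rest' (S.drop W.1) (acc ++ [sliceN I s0 idx]) ([] ++ [e]) (some (pvGetTs e))
          = (segBCut I m (segBFlags S g (rest'.map pvGetTs) W.1 (some (pvGetTs e))) (idx + 1) idx
              (acc ++ [PySem.List.slice I (some (s0 : Int)) (some (idx : Int))])).1
            ++ [sliceN I (segBCut I m (segBFlags S g (rest'.map pvGetTs) W.1 (some (pvGetTs e))) (idx + 1) idx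
              (acc ++ [PySem.List.slice I (some (s0 : Int)) (some (idx : Int))])).2 I.length] := by
        rw [PySem.List.slice_natCast]
        have hsl : (I.drop s0).take (idx - s0) = sliceN I s0 idx := rfl
        rw [hsl, show (([] : List (List (String × Int))) ++ [e]) = sliceN I idx (idx + 1) by
          rw [hsingle]; exact List.nil_append _]
        exact ih (idx + 1) W.1 idx (acc ++ [sliceN I s0 idx]) (some (pvGetTs e)) hdropI
          (by omega) (by omega) (by omega)
          (fun _ => ⟨by omega, by rw [Nat.add_sub_cancel, hgetI]⟩) (fun _ => by omega)
      by_cases hw : W.2 = true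
      · have hF : W.2 = true ∧ sliceN I s0 idx ≠ [] := ⟨hw, hcur⟩
        simp only [if_pos hF, Bool.false_eq_true, ne_eq, not_true_eq_false,
          and_false, if_false, hszE]
        rw [segBCut]
        rw [if_pos ⟨hidx0, Or.inl (by rw [hw]; exact Bool.true_or _)⟩]
        exact CUT
      · have hw' : W.2 = false := by simpa using hw
        have hFn : ¬ (W.2 = true ∧ sliceN I s0 idx ≠ []) := fun h => hw h.1
        simp only [if_neg hFn]
        rw [segBCut]
        by_cases hgap : decide (pvGetTs e - p > g) = true
        · have hC : decide (pvGetTs e - p > g) = true ∧ sliceN I s0 idx ≠ [] := ⟨hgap, hcur⟩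
          simp only [if_pos hC, hszE, Bool.false_eq_true, if_false]
          rw [if_pos ⟨hidx0, Or.inl (by rw [hw', Bool.false_or]; exact hgap)⟩]
          exact CUT
        · have hgap' : decide (pvGetTs e - p > g) = false := by simpa using hgap
          have hCn : ¬ (decide (pvGetTs e - p > g) = true ∧ sliceN I s0 idx ≠ []) := fun h => hgap h.1
          simp only [if_neg hCn]
          by_cases hsz : (idx : Int) - (s0 : Int) ≥ m
          · have hszt : decide (((sliceN I s0 idx).length : Int) ≥ m) = true := by
              rw [hlenc]
              exact decide_eq_true hsz
            simp only [hszt, if_true]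
            rw [if_pos ⟨hidx0, Or.inr hsz⟩]
            exact CUT
          · have hszf : decide (((sliceN I s0 idx).length : Int) ≥ m) = false := by
              rw [hlenc]
              exact decide_eq_false hsz
            simp only [hszf, Bool.false_eq_true, if_false]
            rw [if_neg (by
              intro hx
              rcases hx.2 with h | h
              · rw [hw', Bool.false_or, hgap'] at h
                exact absurd h (by simp)
              · exact hsz h)]
            rw [hsnoc]
            exact ih (idx + 1) W.1 s0 acc (some (pvGetTs e)) hdropI
              (by omega) (by omega) (by omega)
              (fun _ => ⟨by omega, by rw [Nat.add_sub_cancel, hgetI]⟩) (fun _ => by omega)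

-- A's chunks accumulator is append-only
lemma segASnap_prefix (t : Int) :
    ∀ d (chunks : List (List (List (String × Int)))) cur last,
    ∃ L, (segASnap t d chunks cur last).2.1 = chunks ++ L := by
  intro d
  induction d with
  | nil =>
    intro chunks cur last
    exact ⟨[], by simp [segASnap]⟩
  | cons s d' ih =>
    intro chunks cur last
    simp only [segASnap]
    split_ifs with h1 h2
    · obtain ⟨L, hL⟩ := ih (chunks ++ [cur]) [] none
      exact ⟨[cur] ++ L, by rw [hL, List.append_assoc]⟩
    · exact ih chunks cur last
    · exact ⟨[], by simp⟩

lemma segALoop_prefix (g m : Int) :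
    ∀ (rest snaps : List (List (String × Int))) (chunks : List (List (List (String × Int)))) cur last,
    ∃ L, segALoop g m rest snaps chunks cur last = chunks ++ L := by
  intro rest
  induction rest with
  | nil =>
    intro snaps chunks cur last
    simp only [segALoop]
    split_ifs
    · exact ⟨[cur], rfl⟩
    · exact ⟨[], by simp⟩
  | cons e rest' ih =>
    intro snaps chunks cur last
    simp only [segALoop]
    obtain ⟨L1, hL1⟩ := segASnap_prefix (pvGetTs e) snaps chunks cur last
    set s1 := segASnap (pvGetTs e) snaps chunks cur last with hs1
    split_ifs with hgap hsz hsz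
    · obtain ⟨L2, h2⟩ := ih s1.1 ((s1.2.1 ++ [s1.2.2.1]) ++ [[]]) ([] ++ [e]) (some (pvGetTs e))
      exact ⟨L1 ++ [s1.2.2.1] ++ [[]] ++ L2, by rw [h2, hL1]; simp⟩
    · obtain ⟨L2, h2⟩ := ih s1.1 (s1.2.1 ++ [s1.2.2.1]) ([] ++ [e]) (some (pvGetTs e))
      exact ⟨L1 ++ [s1.2.2.1] ++ L2, by rw [h2, hL1]; simp⟩
    · obtain ⟨L2, h2⟩ := ih s1.1 (s1.2.1 ++ [s1.2.2.1]) ([] ++ [e]) (some (pvGetTs e))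
      exact ⟨L1 ++ [s1.2.2.1] ++ L2, by rw [h2, hL1]; simp⟩
    · obtain ⟨L2, h2⟩ := ih s1.1 s1.2.1 (s1.2.2.1 ++ [e]) (some (pvGetTs e))
      exact ⟨L1 ++ L2, by rw [h2, hL1]; simp⟩

-- with m ≤ 0, B's stage 2 cuts at every index
lemma segBCut_D (I : List (List (String × Int))) (m : Int) (hm : m ≤ 0) :
    ∀ (flags : List Bool) (i : Nat) (acc : List (List (List (String × Int)))),
    segBCut I m flags (i + 1) i acc
      = (acc ++ (List.range' i flags.length).map
          (fun j : Nat => PySem.List.slice I (some (j : Int)) (some ((j : Int) + 1))),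
         i + flags.length) := by
  intro flags
  induction flags with
  | nil =>
    intro i acc
    simp [segBCut]
  | cons f rest ih =>
    intro i acc
    rw [segBCut, if_pos ⟨by omega, Or.inr (by omega)⟩]
    rw [ih (i + 1) (acc ++ [PySem.List.slice I (some (i : Int)) (some ((i + 1 : Nat) : Int))])]
    simp only [List.length_cons, List.range'_succ, List.map_cons, Prod.mk.injEq]
    constructor
    · simp only [List.append_assoc, List.singleton_append, Nat.cast_add, Nat.cast_one]
    · omega

lemma segBFlags_length (S : List (List (String × Int))) (g : Int) :
    ∀ (ts : List Int) (si : Nat) (prev : Option Int),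
    (segBFlags S g ts si prev).length = ts.length := by
  intro ts
  induction ts with
  | nil => intro si prev; rfl
  | cons t rest ih => intro si prev; simp [segBFlags, ih]

-- ===== VERDICT (by name: the statement is the Claim_ definition above) =====
theorem segment_into_chunks_spec : Claim_unchanged_segment_into_chunks := by
  intro I S g m _ hPre
  unfold Spec_segment_into_chunks
  intro hnD
  by_cases hI : I = []
  · simp [segment_into_chunks, segment_into_chunks_alt, hI]
  · have hm : 1 ≤ m := by
      unfold D_segment_into_chunks at hnD
      by_contra h
      exact hnD ⟨hI, by omega⟩
    have hS : ∀ s ∈ S, s ≠ [] := by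
      intro s hs hnil
      have := (hPre hI).2 s hs
      rw [hnil] at this
      simp at this
    unfold segment_into_chunks segment_into_chunks_alt
    rw [if_neg hI, if_neg hI]
    have h := main_corr I S g m hm hS I 0 0 0 [] none (by simp) (by simp) (le_refl 0)
      (fun _ => ⟨rfl, rfl⟩) (fun h => absurd h (by omega)) (fun h => absurd h hI)
    rw [List.drop_zero, sliceN_self] at h
    show segALoop g m I S [] [] none
        = (segBCut I m (segBFlags S g (I.map pvGetTs) 0 none) 0 0 []).1
          ++ [PySem.List.slice I
              (some (((segBCut I m (segBFlags S g (I.map pvGetTs) 0 none) 0 0 []).2 : Nat) : Int)) none]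
    rw [PySem.List.slice_from_natCast, ← sliceN_full]
    exact h

theorem segment_into_chunks_changed : Claim_changed_segment_into_chunks := by
  unfold Claim_changed_segment_into_chunks; decide

theorem segment_into_chunks_tight : Claim_exact_segment_into_chunks := by
  intro I S g m _ hPre hD heq
  obtain ⟨hI, hm⟩ := hD
  obtain ⟨e, rest', hIe⟩ := List.exists_cons_of_ne_nil hI
  have hS : ∀ s ∈ S, s ≠ [] := by
    intro s hs hnil
    have := (hPre hI).2 s hs
    rw [hnil] at this
    simp at this
  -- A's result starts with an empty chunk
  have hA : (segment_into_chunks I S g m).head? = some [] := by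
    unfold segment_into_chunks
    rw [if_neg hI, hIe]
    simp only [segALoop]
    rw [snapA_eq S (pvGetTs e) hS S 0 [] [] none (by simp)]
    have hflush : ¬ ((segBWhile S (pvGetTs e) 0).2 = true ∧
        ([] : List (List (String × Int))) ≠ []) := by simp
    have hg2 : ¬ ((false : Bool) = true ∧ ([] : List (List (String × Int))) ≠ []) := by simp
    have hszt : decide ((([] : List (List (String × Int))).length : Int) ≥ m) = true :=
      decide_eq_true (by simp only [List.length_nil, Nat.cast_zero]; omega)
    simp only [if_neg hflush, if_neg hg2, hszt, if_true, List.nil_append]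
    obtain ⟨L, hL⟩ := segALoop_prefix g m rest' (S.drop (segBWhile S (pvGetTs e) 0).1)
      [[]] [e] (some (pvGetTs e))
    rw [hL]
    rfl
  -- every chunk of B's result is non-empty
  have hB : ∃ c, (segment_into_chunks_alt I S g m).head? = some c ∧ c ≠ [] := by
    have halt : segment_into_chunks_alt I S g m
        = (segBCut I m (segBFlags S g (I.map pvGetTs) 0 none) 0 0 []).1
          ++ [PySem.List.slice I
              (some (((segBCut I m (segBFlags S g (I.map pvGetTs) 0 none) 0 0 []).2 : Nat) : Int)) none] := by
      unfold segment_into_chunks_alt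
      rw [if_neg hI]
    rw [halt, hIe, List.map_cons]
    simp only [segBFlags]
    rw [segBCut, if_neg (fun h => h.1 rfl), segBCut_D (e :: rest') m hm, segBFlags_length, List.length_map]
    cases rest' with
    | nil =>
      refine ⟨I, ?_, hIe ▸ by simp⟩
      simp only [List.nil_append, Nat.zero_add]
      rw [PySem.List.slice_from_natCast]
      simp [hIe]
    | cons e2 r2 =>
      refine ⟨[e], ?_, by simp⟩
      rw [List.length_cons, List.range'_succ, List.map_cons]
      simp only [List.nil_append, List.cons_append, List.head?_cons]
      rw [show ((0 : Nat) : Int) + 1 = ((0 : Nat) : Int) + ((1 : Nat) : Int) by norm_num,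
        PySem.List.slice_natCast_add]
      rfl
  obtain ⟨c, hc, hcne⟩ := hB
  rw [heq] at hA
  exact hcne (Option.some.inj (hc.symm.trans hA))
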